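-- pv_equiv track=rewrite | github.com/YuhengHuang42/trust_codeLLM | utility/utils.py | get_line_to_char_index_mapping
-- ===== SOURCE A (Python) =====
-- def get_line_to_char_index_mapping(text):
--     """
--     Obtain the string split by lines --> original character index.
--     Return:
--         List[List]: the list of [start, end) line position.
--     """
--     lines = text.splitlines(keepends=True)  # Split lines but keep newline characters
--     index_mapping = []
--     current_index = 0
--
--     for line in lines:
--         line_length = len(line)
--         line_mapping = [current_index, current_index + line_length]
--         index_mapping.append(line_mapping)
--         current_index += line_length
--
--     return index_mapping
-- ===== SOURCE B (Python) =====
-- def get_line_to_char_index_mapping(text):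
--     """
--     Obtain the string split by lines --> original character index.
--     Return:
--         List[List]: the list of [start, end) line position.
--     """
--     lens = [len(line) for line in text.splitlines(keepends=True)]
--     ends = []
--     total = 0
--     for n in lens:
--         total += n
--         ends.append(total)
--     starts = [0] + ends[:-1]
--     return [[s, e] for s, e in zip(starts, ends)]
-- ===== Notes on version B (the rewrite author's own statement) =====
-- stated objective: alternative
-- what changed: Replaces the single running-index loop that builds pairs in place with a multi-pass pipeline: a list of line lengths, a prefix-sum table of end offsets, starts derived as [0]+ends[:-1], and a final zip into pairs.
import Mathlib
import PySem

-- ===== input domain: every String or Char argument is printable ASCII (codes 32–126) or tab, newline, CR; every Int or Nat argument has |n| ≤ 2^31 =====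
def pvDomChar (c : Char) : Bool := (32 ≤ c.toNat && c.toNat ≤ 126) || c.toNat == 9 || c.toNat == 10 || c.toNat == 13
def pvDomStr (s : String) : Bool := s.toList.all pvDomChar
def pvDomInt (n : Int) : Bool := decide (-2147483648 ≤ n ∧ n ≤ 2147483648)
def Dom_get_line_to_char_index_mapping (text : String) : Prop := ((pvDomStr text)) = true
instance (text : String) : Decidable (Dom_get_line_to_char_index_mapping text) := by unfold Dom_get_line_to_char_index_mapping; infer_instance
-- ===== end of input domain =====

-- B changes the decomposition only (lengths, prefix-sum ends, shifted starts, zip) — same O(n) cost.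

-- ===== PORT A =====
-- text.splitlines(keepends=True), hand-ported (exact on the Dom alphabet: only '\n', '\r', '\r\n' are line breaks there)
def pvSplitKeep : List Char → List (List Char)
  | [] => []
  | '\r' :: '\n' :: rest => ['\r', '\n'] :: pvSplitKeep rest
  | '\r' :: rest => ['\r'] :: pvSplitKeep rest
  | '\n' :: rest => ['\n'] :: pvSplitKeep rest
  | c :: rest =>
      match pvSplitKeep rest with
      | [] => [[c]]
      | l :: ls => (c :: l) :: ls

def get_line_to_char_index_mapping (text : String) : List (List Int) :=
  let lines := pvSplitKeep text.toList
  (lines.foldl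
    (fun (st : List (List Int) × Int) line =>
      let line_length : Int := line.length
      (st.1 ++ [[st.2, st.2 + line_length]], st.2 + line_length))
    ([], 0)).1

-- ===== PORT B =====
def get_line_to_char_index_mapping_alt (text : String) : List (List Int) :=
  let lens : List Int := (pvSplitKeep text.toList).map (fun l => (l.length : Int))
  let ends : List Int :=
    (lens.foldl (fun (st : List Int × Int) n => (st.1 ++ [st.2 + n], st.2 + n)) ([], 0)).1
  let starts : List Int := 0 :: ends.dropLast
  (starts.zip ends).map (fun p => [p.1, p.2])

-- ===== PRECONDITION & SPEC =====
def Spec_get_line_to_char_index_mapping (text : String) (out : List (List Int)) : Prop := out = get_line_to_char_index_mapping_alt text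
instance (text : String) (out : List (List Int)) : Decidable (Spec_get_line_to_char_index_mapping text out) := by unfold Spec_get_line_to_char_index_mapping; infer_instance

-- ===== CLAIM (what is proved, stated in full; the proofs are below) =====
def Claim_equal_get_line_to_char_index_mapping : Prop := ∀ (text : String), Dom_get_line_to_char_index_mapping text → Spec_get_line_to_char_index_mapping text (get_line_to_char_index_mapping text)

-- ===== LEMMAS AND PROOFS =====

-- reference form of A's result: ranges starting at c over the given lines
def pvRanges (c : Int) : List (List Char) → List (List Int)
  | [] => []
  | l :: ls => [c, c + l.length] :: pvRanges (c + (l.length : Int)) ls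

-- prefix sums (end offsets) starting at c
def pvEnds (c : Int) : List Int → List Int
  | [] => []
  | n :: ns => (c + n) :: pvEnds (c + n) ns

theorem foldA_eq (lines : List (List Char)) : ∀ (acc : List (List Int)) (c : Int),
    (lines.foldl
      (fun (st : List (List Int) × Int) line =>
        let line_length : Int := line.length
        (st.1 ++ [[st.2, st.2 + line_length]], st.2 + line_length))
      (acc, c)).1 = acc ++ pvRanges c lines := by
  induction lines with
  | nil => intro acc c; simp [pvRanges]
  | cons l ls ih => intro acc c; simp [List.foldl, pvRanges, ih, List.append_assoc]

theorem foldB_eq (lens : List Int) : ∀ (acc : List Int) (c : Int),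
    (lens.foldl (fun (st : List Int × Int) n => (st.1 ++ [st.2 + n], st.2 + n)) (acc, c)).1
      = acc ++ pvEnds c lens := by
  induction lens with
  | nil => intro acc c; simp [pvEnds]
  | cons n ns ih => intro acc c; simp [List.foldl, pvEnds, ih, List.append_assoc]

theorem zip_ends_eq (lines : List (List Char)) : ∀ (c : Int),
    ((c :: (pvEnds c (lines.map (fun l => (l.length : Int)))).dropLast).zip
        (pvEnds c (lines.map (fun l => (l.length : Int))))).map (fun p => [p.1, p.2])
      = pvRanges c lines := by
  induction lines with
  | nil => intro c; simp [pvEnds, pvRanges]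
  | cons l ls ih =>
      intro c
      cases ls with
      | nil => simp [pvEnds, pvRanges]
      | cons l' ls' =>
          simp only [List.map_cons, pvEnds, pvRanges, List.dropLast_cons₂, List.zip_cons_cons,
            List.map_cons]
          exact congrArg _ (ih (c + l.length))

-- ===== VERDICT (by name: the statement is the Claim_ definition above) =====
theorem get_line_to_char_index_mapping_spec : Claim_equal_get_line_to_char_index_mapping := by
  intro text _
  unfold Spec_get_line_to_char_index_mapping get_line_to_char_index_mapping
    get_line_to_char_index_mapping_alt
  simp only [foldA_eq, foldB_eq, List.nil_append]
  cases h : pvSplitKeep text.toList with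
  | nil => simp [pvRanges, pvEnds]
  | cons l ls =>
      have := zip_ends_eq (l :: ls) 0
      simp only [List.map_cons] at this
      simpa using this.symm
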